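-- pv_equiv track=rewrite | github.com/wozaidili/bert_ner | bert_medical_ner/test_file.py | split_entity
-- ===== SOURCE A (Python) =====
-- def split_entity(label_sequence):
--     entity_mark = dict()
--     entity_pointer = None
--     for index, label in enumerate(label_sequence):
--         if label.startswith('B'):
--             category = label.split('_')[1]
--             entity_pointer = (index, category)
--             entity_mark.setdefault(entity_pointer, [label])
--         elif label.startswith('M'):
--             if entity_pointer is None: continue
--             if entity_pointer[1] != label.split('_')[1]: continue
--             entity_mark[entity_pointer].append(label)
--         elif label.startswith('E'):
--             if entity_pointer is None: continue
--             if entity_pointer[1] != label.split('_')[1]: continue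
--             entity_mark[entity_pointer].append(label)
--         else:
--             entity_pointer = None
--     return entity_mark
-- ===== SOURCE B (Python) =====
-- def split_entity(label_sequence):
--     # find-and-extend: locate each 'B' tag, scan forward collecting matching M/E tags
--     n = len(label_sequence)
--     entity_mark = {}
--     i = 0
--     while i < n:
--         label = label_sequence[i]
--         if not label.startswith('B'):
--             i += 1
--             continue
--         category = label.split('_')[1]
--         parts = [label]
--         j = i + 1
--         while j < n:
--             lab = label_sequence[j]
--             if lab.startswith('B') or not (lab.startswith('M') or lab.startswith('E')):
--                 break
--             if lab.split('_')[1] == category: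
--                 parts.append(lab)
--             j += 1
--         entity_mark[(i, category)] = parts
--         i = j
--     return entity_mark
-- ===== Notes on version B (the rewrite author's own statement) =====
-- stated objective: alternative
-- what changed: Replaces A's single-pass state machine (dict + entity_pointer carried across every label) with a find-and-extend decomposition: locate each 'B' label, run an inner forward scan collecting its matching M/E continuations until another 'B' or an 'other' label, and jump the outer index past the scanned region.
import Mathlib
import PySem

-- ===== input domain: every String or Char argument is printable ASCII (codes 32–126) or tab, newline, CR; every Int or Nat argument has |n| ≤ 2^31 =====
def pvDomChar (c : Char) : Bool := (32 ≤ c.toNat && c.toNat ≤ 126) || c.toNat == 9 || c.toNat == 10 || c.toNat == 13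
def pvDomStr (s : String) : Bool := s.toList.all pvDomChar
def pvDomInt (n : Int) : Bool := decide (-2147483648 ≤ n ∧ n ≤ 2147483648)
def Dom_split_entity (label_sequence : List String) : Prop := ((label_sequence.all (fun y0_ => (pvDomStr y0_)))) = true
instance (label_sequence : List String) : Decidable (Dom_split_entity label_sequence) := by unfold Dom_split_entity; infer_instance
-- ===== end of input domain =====

set_option maxHeartbeats 800000


-- B restructures A's running state-machine (dict + entity_pointer over enumerate) into a
-- find-and-extend decomposition: locate each 'B' tag, scan forward once collecting its M/E
-- continuations, and jump the outer index past the scanned region (objective: alternative).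

-- label.split('_')[1]; the "" defaults are unreachable: the separator is the literal "_" (≠ ""),
-- and Pre_split_entity guarantees index 1 exists wherever the Python evaluates this expression.
def catOf (label : String) : String :=
  match PySem.Str.split? label "_" with
  | some parts => (PySem.List.pyGet? parts 1).getD ""
  | none => ""

-- ===== PORT A =====
-- the for-loop over enumerate(label_sequence), state = (entity_mark, entity_pointer), i the running index
def aLoop (em : PySem.Dict (Int × String) (List String)) (ptr : Option (Int × String)) (i : Int) :
    List String → PySem.Dict (Int × String) (List String)
  | [] => em
  | label :: rest =>
    if PySem.Str.startswith label "B" then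
      let category := catOf label
      let ep : Int × String := (i, category)
      aLoop (em.setdefault ep [label]) (some ep) (i + 1) rest
    else if PySem.Str.startswith label "M" then
      match ptr with
      | none => aLoop em ptr (i + 1) rest
      | some ep =>
        if ep.2 ≠ catOf label then aLoop em ptr (i + 1) rest
        else aLoop (em.modify ep [] (· ++ [label])) ptr (i + 1) rest
    else if PySem.Str.startswith label "E" then
      match ptr with
      | none => aLoop em ptr (i + 1) rest
      | some ep =>
        if ep.2 ≠ catOf label then aLoop em ptr (i + 1) rest
        else aLoop (em.modify ep [] (· ++ [label])) ptr (i + 1) rest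
    else aLoop em none (i + 1) rest

def split_entity (label_sequence : List String) : List (Int × String × List String) :=
  ((aLoop PySem.Dict.empty none 0 label_sequence).items).map (fun p => (p.1.1, p.1.2, p.2))

-- ===== PORT B =====
-- inner scan: collect M/E labels matching category, stop at a 'B' or an 'other' label;
-- returns (matched labels, number of labels consumed, remaining labels)
def bScan (category : String) : List String → List String × Int × List String
  | [] => ([], 0, [])
  | lab :: rest =>
    if PySem.Str.startswith lab "B" || !(PySem.Str.startswith lab "M" || PySem.Str.startswith lab "E") then
      ([], 0, lab :: rest)
    else
      let s := bScan category rest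
      ((if catOf lab = category then lab :: s.1 else s.1), s.2.1 + 1, s.2.2)

theorem bScan_rem_le (category : String) (l : List String) :
    (bScan category l).2.2.length ≤ l.length := by
  induction l with
  | nil => simp [bScan]
  | cons lab rest ih =>
    simp only [bScan]
    split
    · simp
    · simpa using Nat.le_succ_of_le ih

-- outer loop: i is the position of the head of the remaining list
def bLoop (i : Int) : List String → List (Int × String × List String)
  | [] => []
  | label :: rest =>
    if PySem.Str.startswith label "B" then
      let category := catOf label
      let s := bScan category rest
      (i, category, label :: s.1) :: bLoop (i + 1 + s.2.1) s.2.2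
    else bLoop (i + 1) rest
termination_by l => l.length
decreasing_by
  · exact Nat.lt_succ_of_le (bScan_rem_le _ rest)
  · simp

def split_entity_alt (label_sequence : List String) : List (Int × String × List String) :=
  bLoop 0 label_sequence

-- ===== PRECONDITION & SPEC =====
-- 'entity_pointer' is active at position i iff some earlier 'B' label is separated from i
-- only by B/M/E-prefixed labels
def ActiveAt (ls : List String) (i : Nat) : Prop :=
  ∃ j < i, PySem.Str.startswith (ls.getD j "") "B" = true ∧
    ∀ k, k < i → j < k →
      (PySem.Str.startswith (ls.getD k "") "B" || PySem.Str.startswith (ls.getD k "") "M" ||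
       PySem.Str.startswith (ls.getD k "") "E") = true

-- Pre_ excludes exactly the inputs on which the Python raises IndexError: a 'B' label without
-- '_' (split('_')[1] is evaluated unconditionally), or an 'M'/'E' label without '_' reached
-- while an entity pointer is active (only then is split('_')[1] evaluated on it).
def Pre_split_entity (label_sequence : List String) : Prop :=
  ∀ i, i < label_sequence.length →
    (PySem.Str.startswith (label_sequence.getD i "") "B" = true →
      2 ≤ ((PySem.Str.split? (label_sequence.getD i "") "_").getD []).length) ∧
    ((PySem.Str.startswith (label_sequence.getD i "") "M" = true ∨
      PySem.Str.startswith (label_sequence.getD i "") "E" = true) → ActiveAt label_sequence i →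
      2 ≤ ((PySem.Str.split? (label_sequence.getD i "") "_").getD []).length)

instance (label_sequence : List String) : Decidable (Pre_split_entity label_sequence) := by
  unfold Pre_split_entity ActiveAt; infer_instance

def pvWitness_split_entity : List String :=
  ["B_dis", "M_dis", "O", "B_sym", "E_sym", "M_dis", "B_sym", "E_dis", "E_sym"]

def Spec_split_entity (label_sequence : List String) (out : List (Int × String × List String)) : Prop := out = split_entity_alt label_sequence
instance (label_sequence : List String) (out : List (Int × String × List String)) : Decidable (Spec_split_entity label_sequence out) := by unfold Spec_split_entity; infer_instance

-- ===== CLAIM (what is proved, stated in full; the proofs are below) =====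
def Claim_equal_split_entity : Prop := ∀ (label_sequence : List String), Dom_split_entity label_sequence → Pre_split_entity label_sequence → Spec_split_entity label_sequence (split_entity label_sequence)

-- ===== LEMMAS AND PROOFS =====

-- flatten an association-list pair back into the output triple shape
def pairOf (t : Int × String × List String) : (Int × String) × List String := ((t.1, t.2.1), t.2.2)

theorem contains_false_of_keys_lt {ν : Type} (em : PySem.Dict (Int × String) ν) (i : Int) (c : String)
    (h : ∀ p ∈ em.items, p.1.1 < i) : em.contains (i, c) = false := by
  by_contra hc
  have hc' : em.contains (i, c) = true := by
    cases h' : em.contains (i, c) <;> simp_all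
  rw [PySem.Dict.contains_iff_mem_keys] at hc'
  have : (i, c) ∈ em.items.map (·.1) := hc'
  obtain ⟨p, hp, hpe⟩ := List.mem_map.mp this
  have := h p hp
  rw [hpe] at this
  omega

theorem get?_last {ν : Type} (front : List ((Int × String) × ν)) (ep : Int × String) (parts : ν)
    (hfr : ∀ p ∈ front, p.1 ≠ ep) :
    (PySem.Dict.mk (front ++ [(ep, parts)]) : PySem.Dict (Int × String) ν).get? ep = some parts := by
  induction front with
  | nil => simp [PySem.Dict.get?_mk_cons]
  | cons p front ih =>
    have hne : p.1 ≠ ep := hfr p (by simp)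
    rw [List.cons_append, PySem.Dict.get?_mk_cons]
    simp only [beq_iff_eq, if_neg hne]
    exact ih (fun q hq => hfr q (by simp [hq]))

theorem items_modify_last {ν : Type} (em : PySem.Dict (Int × String) ν)
    (front : List ((Int × String) × ν)) (ep : Int × String) (parts : ν) (d0 : ν) (f : ν → ν)
    (hitems : em.items = front ++ [(ep, parts)]) (hfr : ∀ p ∈ front, p.1 ≠ ep) :
    (em.modify ep d0 f).items = front ++ [(ep, f parts)] := by
  obtain ⟨l⟩ := em
  simp only at hitems
  subst hitems
  have hget : (PySem.Dict.mk (front ++ [(ep, parts)]) : PySem.Dict (Int × String) ν).getD ep d0 = parts := by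
    rw [PySem.Dict.getD_eq_get?_getD, get?_last front ep parts hfr]
    rfl
  have hcont : (PySem.Dict.mk (front ++ [(ep, parts)]) : PySem.Dict (Int × String) ν).contains ep = true := by
    rw [PySem.Dict.contains_iff_mem_keys]
    show ep ∈ (PySem.Dict.mk (front ++ [(ep, parts)]) : PySem.Dict (Int × String) ν).items.map (·.1)
    simp
  show ((PySem.Dict.mk (front ++ [(ep, parts)])).insert ep
      (f ((PySem.Dict.mk (front ++ [(ep, parts)]) : PySem.Dict (Int × String) ν).getD ep d0))).items = _
  rw [hget, PySem.Dict.items_insert_of_contains _ _ hcont]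
  show List.map _ (front ++ [(ep, parts)]) = _
  rw [List.map_append]
  congr 1
  · have h : ∀ p ∈ front, (fun p => if (p.1 == ep) = true then (ep, f parts) else p) p = id p := by
      intro p hp
      have := hfr p hp
      simp [this]
    rw [List.map_congr_left h, List.map_id]
  · simp

theorem items_setdefault_fresh {ν : Type} (em : PySem.Dict (Int × String) ν) (i : Int) (c : String)
    (v : ν) (h : ∀ p ∈ em.items, p.1.1 < i) :
    (em.setdefault (i, c) v).items = em.items ++ [((i, c), v)] := by
  rw [PySem.Dict.setdefault_of_not_contains _ _ (contains_false_of_keys_lt em i c h),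
    PySem.Dict.items_insert_of_not_contains _ _ (contains_false_of_keys_lt em i c h)]

-- one-step equations for the three loops, keyed on the startswith tests
theorem bScan_cons_B (c lab : String) (rest : List String)
    (h : PySem.Str.startswith lab "B" = true) : bScan c (lab :: rest) = ([], 0, lab :: rest) := by
  have h' := h; simp at h'
  simp [bScan, h']

theorem bScan_cons_other (c lab : String) (rest : List String)
    (hB : PySem.Str.startswith lab "B" = false) (hM : PySem.Str.startswith lab "M" = false)
    (hE : PySem.Str.startswith lab "E" = false) : bScan c (lab :: rest) = ([], 0, lab :: rest) := by
  have hB' := hB; have hM' := hM; have hE' := hE; simp at hB' hM' hE'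
  simp [bScan, hB', hM', hE']

theorem bScan_cons_M (c lab : String) (rest : List String)
    (hB : PySem.Str.startswith lab "B" = false) (hM : PySem.Str.startswith lab "M" = true) :
    bScan c (lab :: rest) =
      ((if catOf lab = c then lab :: (bScan c rest).1 else (bScan c rest).1),
        (bScan c rest).2.1 + 1, (bScan c rest).2.2) := by
  have hB' := hB; have hM' := hM; simp at hB' hM'
  simp [bScan, hB', hM']

theorem bScan_cons_E (c lab : String) (rest : List String)
    (hB : PySem.Str.startswith lab "B" = false) (hE : PySem.Str.startswith lab "E" = true) :
    bScan c (lab :: rest) =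
      ((if catOf lab = c then lab :: (bScan c rest).1 else (bScan c rest).1),
        (bScan c rest).2.1 + 1, (bScan c rest).2.2) := by
  have hB' := hB; have hE' := hE; simp at hB' hE'
  simp [bScan, hB', hE']

theorem bLoop_cons_B (i : Int) (lab : String) (rest : List String)
    (h : PySem.Str.startswith lab "B" = true) :
    bLoop i (lab :: rest) =
      (i, catOf lab, lab :: (bScan (catOf lab) rest).1) ::
        bLoop (i + 1 + (bScan (catOf lab) rest).2.1) (bScan (catOf lab) rest).2.2 := by
  have h' := h; simp at h'
  simp [bLoop, h']

theorem bLoop_cons_notB (i : Int) (lab : String) (rest : List String)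
    (h : PySem.Str.startswith lab "B" = false) : bLoop i (lab :: rest) = bLoop (i + 1) rest := by
  have h' := h; simp at h'
  simp [bLoop, h']

theorem aLoop_cons_B (em : PySem.Dict (Int × String) (List String)) (ptr : Option (Int × String))
    (i : Int) (lab : String) (rest : List String) (h : PySem.Str.startswith lab "B" = true) :
    aLoop em ptr i (lab :: rest) =
      aLoop (em.setdefault (i, catOf lab) [lab]) (some (i, catOf lab)) (i + 1) rest := by
  have h' := h; simp at h'
  simp [aLoop, h']

theorem aLoop_cons_skip (em : PySem.Dict (Int × String) (List String)) (i : Int) (lab : String)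
    (rest : List String) (hB : PySem.Str.startswith lab "B" = false) :
    aLoop em none i (lab :: rest) = aLoop em none (i + 1) rest := by
  have hB' := hB; simp at hB'
  by_cases hM : PySem.Str.startswith lab "M" = true
  · have hM' := hM; simp at hM'
    simp [aLoop, hB', hM']
  · have hM' : PySem.Str.startswith lab "M" = false := by cases h : PySem.Str.startswith lab "M" <;> simp_all
    simp at hM'
    by_cases hE : PySem.Str.startswith lab "E" = true
    · have hE' := hE; simp at hE'
      simp [aLoop, hB', hM', hE']
    · have hE' : PySem.Str.startswith lab "E" = false := by cases h : PySem.Str.startswith lab "E" <;> simp_all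
      simp at hE'
      simp [aLoop, hB', hM', hE']

theorem aLoop_cons_ME_mismatch (em : PySem.Dict (Int × String) (List String)) (ep : Int × String)
    (i : Int) (lab : String) (rest : List String) (hB : PySem.Str.startswith lab "B" = false)
    (hME : PySem.Str.startswith lab "M" = true ∨ PySem.Str.startswith lab "E" = true)
    (hc : ep.2 ≠ catOf lab) :
    aLoop em (some ep) i (lab :: rest) = aLoop em (some ep) (i + 1) rest := by
  have hB' := hB; simp at hB'
  rcases hME with hM | hE
  · have hM' := hM; simp at hM'
    simp [aLoop, hB', hM', hc]
  · have hE' := hE; simp at hE'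
    by_cases hM : PySem.Str.startswith lab "M" = true
    · have hM' := hM; simp at hM'
      simp [aLoop, hB', hM', hc]
    · have hM' : PySem.Str.startswith lab "M" = false := by cases h : PySem.Str.startswith lab "M" <;> simp_all
      simp at hM'
      simp [aLoop, hB', hM', hE', hc]

theorem aLoop_cons_ME_match (em : PySem.Dict (Int × String) (List String)) (ep : Int × String)
    (i : Int) (lab : String) (rest : List String) (hB : PySem.Str.startswith lab "B" = false)
    (hME : PySem.Str.startswith lab "M" = true ∨ PySem.Str.startswith lab "E" = true)
    (hc : ep.2 = catOf lab) :
    aLoop em (some ep) i (lab :: rest) =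
      aLoop (em.modify ep [] (· ++ [lab])) (some ep) (i + 1) rest := by
  have hB' := hB; simp at hB'
  rcases hME with hM | hE
  · have hM' := hM; simp at hM'
    simp [aLoop, hB', hM', hc]
  · have hE' := hE; simp at hE'
    by_cases hM : PySem.Str.startswith lab "M" = true
    · have hM' := hM; simp at hM'
      simp [aLoop, hB', hM', hc]
    · have hM' : PySem.Str.startswith lab "M" = false := by cases h : PySem.Str.startswith lab "M" <;> simp_all
      simp at hM'
      simp [aLoop, hB', hM', hE', hc]

theorem aLoop_cons_other (em : PySem.Dict (Int × String) (List String)) (ptr : Option (Int × String))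
    (i : Int) (lab : String) (rest : List String) (hB : PySem.Str.startswith lab "B" = false)
    (hM : PySem.Str.startswith lab "M" = false) (hE : PySem.Str.startswith lab "E" = false) :
    aLoop em ptr i (lab :: rest) = aLoop em none (i + 1) rest := by
  have hB' := hB; have hM' := hM; have hE' := hE; simp at hB' hM' hE'
  simp [aLoop, hB', hM', hE']

theorem aLoop_eq_bLoop (rest : List String) :
    (∀ (em : PySem.Dict (Int × String) (List String)) (front : List ((Int × String) × List String))
      (i : Int), em.items = front → (∀ p ∈ front, p.1.1 < i) →
      (aLoop em none i rest).items = front ++ (bLoop i rest).map pairOf) ∧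
    (∀ (em : PySem.Dict (Int × String) (List String)) (front : List ((Int × String) × List String))
      (ep : Int × String) (parts : List String) (i : Int),
      em.items = front ++ [(ep, parts)] → ep.1 < i → (∀ p ∈ front, p.1.1 < ep.1) →
      (aLoop em (some ep) i rest).items =
        front ++ [(ep, parts ++ (bScan ep.2 rest).1)] ++
          (bLoop (i + (bScan ep.2 rest).2.1) (bScan ep.2 rest).2.2).map pairOf) := by
  induction rest with
  | nil =>
    constructor
    · intro em front i hitems _
      simpa [aLoop, bLoop] using hitems
    · intro em front ep parts i hitems _ _
      simpa [aLoop, bLoop, bScan] using hitems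
  | cons label rest ih =>
    have keylt : ∀ (front : List ((Int × String) × List String)) (ep : Int × String)
        (parts : List String) (i : Int), (∀ p ∈ front, p.1.1 < ep.1) → ep.1 < i →
        ∀ p ∈ front ++ [(ep, parts)], p.1.1 < i := by
      intro front ep parts i hf hlt p hp
      rcases List.mem_append.mp hp with h | h
      · exact lt_trans (hf p h) hlt
      · simp at h; rw [h]; exact hlt
    constructor
    · -- no active pointer
      intro em front i hitems hlt
      by_cases hB : PySem.Str.startswith label "B" = true
      · have hfresh := items_setdefault_fresh em i (catOf label) [label] (hitems ▸ hlt)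
        have h2 := ih.2 (em.setdefault (i, catOf label) [label]) front (i, catOf label) [label]
          (i + 1) (by rw [hfresh, hitems]) (by simp) hlt
        rw [aLoop_cons_B em none i label rest hB, bLoop_cons_B i label rest hB, h2]
        simp [pairOf, List.append_assoc]
      · have hB' : PySem.Str.startswith label "B" = false := by
          cases h : PySem.Str.startswith label "B" <;> simp_all
        have h1 := ih.1 em front (i + 1) hitems (fun p hp => lt_trans (hlt p hp) (by omega))
        rw [aLoop_cons_skip em i label rest hB', bLoop_cons_notB i label rest hB', h1]
    · -- active pointer ep, last entry of the dict is (ep, parts)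
      intro em front ep parts i hitems hlt hf
      have hfrne : ∀ p ∈ front, p.1 ≠ ep := by
        intro p hp he
        have := hf p hp
        rw [he] at this
        omega
      by_cases hB : PySem.Str.startswith label "B" = true
      · have hkeys : ∀ p ∈ em.items, p.1.1 < i := by
          rw [hitems]; exact keylt front ep parts i hf hlt
        have hfresh := items_setdefault_fresh em i (catOf label) [label] hkeys
        have h2 := ih.2 (em.setdefault (i, catOf label) [label]) (front ++ [(ep, parts)])
          (i, catOf label) [label] (i + 1) (by rw [hfresh, hitems]) (by simp)
          (keylt front ep parts i hf hlt)
        rw [aLoop_cons_B em (some ep) i label rest hB, h2, bScan_cons_B ep.2 label rest hB]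
        simp [pairOf, bLoop_cons_B i label rest hB, List.append_assoc]
      · have hB' : PySem.Str.startswith label "B" = false := by
          cases h : PySem.Str.startswith label "B" <;> simp_all
        by_cases hME : PySem.Str.startswith label "M" = true ∨ PySem.Str.startswith label "E" = true
        · have hscan : bScan ep.2 (label :: rest) =
              ((if catOf label = ep.2 then label :: (bScan ep.2 rest).1 else (bScan ep.2 rest).1),
                (bScan ep.2 rest).2.1 + 1, (bScan ep.2 rest).2.2) := by
            rcases hME with hM | hE
            · exact bScan_cons_M ep.2 label rest hB' hM
            · exact bScan_cons_E ep.2 label rest hB' hE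
          by_cases hc : ep.2 = catOf label
          · have hmod := items_modify_last em front ep parts [] (· ++ [label]) hitems hfrne
            have h2 := ih.2 (em.modify ep [] (· ++ [label])) front ep (parts ++ [label]) (i + 1)
              hmod (by omega) hf
            rw [aLoop_cons_ME_match em ep i label rest hB' hME hc, h2, hscan]
            have harith : i + ((bScan ep.2 rest).2.1 + 1) = i + 1 + (bScan ep.2 rest).2.1 := by ring
            rw [harith, if_pos hc.symm]
            simp [List.append_assoc]
          · have h2 := ih.2 em front ep parts (i + 1) hitems (by omega) hf
            rw [aLoop_cons_ME_mismatch em ep i label rest hB' hME hc, h2, hscan]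
            have harith : i + ((bScan ep.2 rest).2.1 + 1) = i + 1 + (bScan ep.2 rest).2.1 := by ring
            rw [harith, if_neg (fun h => hc h.symm)]
        · have hM' : PySem.Str.startswith label "M" = false := by
            cases h : PySem.Str.startswith label "M" <;> simp_all
          have hE' : PySem.Str.startswith label "E" = false := by
            cases h : PySem.Str.startswith label "E" <;> simp_all
          have h1 := ih.1 em (front ++ [(ep, parts)]) (i + 1) hitems
            (fun p hp => lt_trans (keylt front ep parts i hf hlt p hp) (by omega))
          rw [aLoop_cons_other em (some ep) i label rest hB' hM' hE', h1,
            bScan_cons_other ep.2 label rest hB' hM' hE']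
          simp [bLoop_cons_notB i label rest hB', List.append_assoc]

-- ===== VERDICT (by name: the statement is the Claim_ definition above) =====
theorem split_entity_spec : Claim_equal_split_entity := by
  intro ls _ _
  show _ = _
  unfold split_entity split_entity_alt
  rw [(aLoop_eq_bLoop ls).1 PySem.Dict.empty [] 0 rfl (by simp)]
  simp [pairOf, Function.comp_def]
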